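-- pv_equiv track=rewrite | github.com/Preranaaa0504/AURENIUM_Trial | yfinanceFinal.py | get_visualization_type
-- ===== SOURCE A (Python) =====
-- def get_visualization_type(query):
--     query = query.lower()
--     if any(term in query for term in ["candlestick", "candle", "ohlc"]):
--         return "candlestick"
--     elif any(term in query for term in ["volume", "trading volume"]):
--         return "volume"
--     elif any(term in query for term in ["moving average", "ma", "ema", "sma"]):
--         return "moving_average"
--     elif any(term in query for term in ["compare", "comparison", "versus", "vs"]):
--         return "comparison"
--     elif any(term in query for term in ["correlation", "relate", "relationship"]):
--         return "correlation"
--     elif any(term in query for term in ["distribution", "histogram"]):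
--         return "distribution"
--     elif any(term in query for term in ["volatility", "risk"]):
--         return "volatility"
--     return "line"
-- ===== SOURCE B (Python) =====
-- GROUPS = [
--     ["candlestick", "candle", "ohlc"],
--     ["volume", "trading volume"],
--     ["moving average", "ma", "ema", "sma"],
--     ["compare", "comparison", "versus", "vs"],
--     ["correlation", "relate", "relationship"],
--     ["distribution", "histogram"],
--     ["volatility", "risk"],
-- ]
-- TERMS = [(p, t) for p, group in enumerate(GROUPS) for t in group]
-- NAMES = ["candlestick", "volume", "moving_average", "comparison",
--          "correlation", "distribution", "volatility", "line"]
--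
-- def get_visualization_type(query):
--     # Single left-to-right scan over the query's positions: at each position,
--     # record the best (lowest) priority of any keyword that STARTS there;
--     # finally index the names table with the aggregated minimum.
--     q = query.lower()
--     best = len(NAMES) - 1  # 7 == no keyword found -> "line"
--     for i in range(len(q) + 1):
--         suf = q[i:]
--         for p, term in TERMS:
--             if p < best and suf.startswith(term):
--                 best = p
--     return NAMES[best]
-- ===== Notes on version B (the rewrite author's own statement) =====
-- stated objective: alternative
-- what changed: Replaces A's per-category substring-membership if/elif ladder with a single position scan: walk the lowered query once, at each position prefix-match all keywords and aggregate the minimum priority of any hit, then index a names table (no 'in' tests, no short-circuit chain); trades speed for a uniform scan-and-min formulation.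
import Mathlib
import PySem

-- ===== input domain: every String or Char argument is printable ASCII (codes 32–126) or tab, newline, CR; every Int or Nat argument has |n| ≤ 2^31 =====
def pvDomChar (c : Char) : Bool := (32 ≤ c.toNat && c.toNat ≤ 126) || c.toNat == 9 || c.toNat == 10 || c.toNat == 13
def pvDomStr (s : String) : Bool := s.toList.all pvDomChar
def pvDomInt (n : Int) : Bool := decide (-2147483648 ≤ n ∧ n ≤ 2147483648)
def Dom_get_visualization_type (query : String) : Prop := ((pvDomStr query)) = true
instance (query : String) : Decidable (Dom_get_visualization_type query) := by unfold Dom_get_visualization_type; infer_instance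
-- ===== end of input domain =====

-- B replaces A's if/elif substring-membership ladder with a single position scan of the
-- lowered query that prefix-matches all keywords at each position and aggregates the
-- minimum priority, then indexes a names table (objective: alternative).


-- ===== PORT A =====
def get_visualization_type (query : String) : String :=
  let q := PySem.Str.lower query
  if ["candlestick", "candle", "ohlc"].any (fun term => PySem.Str.isIn term q) then
    "candlestick"
  else if ["volume", "trading volume"].any (fun term => PySem.Str.isIn term q) then
    "volume"
  else if ["moving average", "ma", "ema", "sma"].any (fun term => PySem.Str.isIn term q) then
    "moving_average"
  else if ["compare", "comparison", "versus", "vs"].any (fun term => PySem.Str.isIn term q) then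
    "comparison"
  else if ["correlation", "relate", "relationship"].any (fun term => PySem.Str.isIn term q) then
    "correlation"
  else if ["distribution", "histogram"].any (fun term => PySem.Str.isIn term q) then
    "distribution"
  else if ["volatility", "risk"].any (fun term => PySem.Str.isIn term q) then
    "volatility"
  else "line"

-- ===== PORT B =====
-- GROUPS from Source B (terms kept as List Char: the port works on code-point lists)
def bG0 : List (List Char) := ["candlestick".toList, "candle".toList, "ohlc".toList]
def bG1 : List (List Char) := ["volume".toList, "trading volume".toList]
def bG2 : List (List Char) := ["moving average".toList, "ma".toList, "ema".toList, "sma".toList]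
def bG3 : List (List Char) := ["compare".toList, "comparison".toList, "versus".toList, "vs".toList]
def bG4 : List (List Char) := ["correlation".toList, "relate".toList, "relationship".toList]
def bG5 : List (List Char) := ["distribution".toList, "histogram".toList]
def bG6 : List (List Char) := ["volatility".toList, "risk".toList]

-- TERMS = [(p, t) for p, group in enumerate(GROUPS) for t in group]
def bTerms : List (Nat × List Char) :=
  (bG0.map fun t => (0, t)) ++ (bG1.map fun t => (1, t)) ++ (bG2.map fun t => (2, t)) ++
  (bG3.map fun t => (3, t)) ++ (bG4.map fun t => (4, t)) ++ (bG5.map fun t => (5, t)) ++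
  (bG6.map fun t => (6, t))

def bNames : List String :=
  ["candlestick", "volume", "moving_average", "comparison",
   "correlation", "distribution", "volatility", "line"]

-- the inner 'for p, term in TERMS' pass at one position (suffix s)
def bStep (s : List Char) (best : Nat) : Nat :=
  bTerms.foldl (fun b pt => if pt.1 < b ∧ PySem.Chars.startswith s pt.2 = true then pt.1 else b) best

-- the outer 'for i in range(len(q)+1)' pass: structural recursion over the suffixes of q
def bLoop : List Char → Nat → Nat
  | [], best => bStep [] best
  | c :: L, best => bLoop L (bStep (c :: L) best)

def get_visualization_type_alt (query : String) : String :=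
  bNames.getD (bLoop (PySem.Chars.lower query.toList) (bNames.length - 1)) "line"

-- ===== PRECONDITION & SPEC =====
def Spec_get_visualization_type (query : String) (out : String) : Prop := out = get_visualization_type_alt query
instance (query : String) (out : String) : Decidable (Spec_get_visualization_type query out) := by unfold Spec_get_visualization_type; infer_instance

-- ===== CLAIM (what is proved, stated in full; the proofs are below) =====
def Claim_equal_get_visualization_type : Prop := ∀ (query : String), Dom_get_visualization_type query → Spec_get_visualization_type query (get_visualization_type query)

-- ===== LEMMAS AND PROOFS =====

-- proof-only helpers: per-position and whole-string group matches, and A's chain as a Nat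
def atHead (g : List (List Char)) (s : List Char) : Bool :=
  g.any (fun t => PySem.Chars.startswith s t)
def anyIn (g : List (List Char)) (L : List Char) : Bool :=
  g.any (fun t => PySem.Chars.isIn t L)
def hd (s : List Char) : Nat :=
  if atHead bG0 s then 0 else if atHead bG1 s then 1 else if atHead bG2 s then 2
  else if atHead bG3 s then 3 else if atHead bG4 s then 4 else if atHead bG5 s then 5
  else if atHead bG6 s then 6 else 7
def cand (L : List Char) : Nat :=
  if anyIn bG0 L then 0 else if anyIn bG1 L then 1 else if anyIn bG2 L then 2
  else if anyIn bG3 L then 3 else if anyIn bG4 L then 4 else if anyIn bG5 L then 5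
  else if anyIn bG6 L then 6 else 7

lemma foldl_grp (s : List Char) (p : Nat) (g : List (List Char)) (b : Nat) :
    g.foldl (fun b t => if p < b ∧ PySem.Chars.startswith s t = true then p else b) b
      = if p < b ∧ atHead g s = true then p else b := by
  induction g generalizing b with
  | nil => simp [atHead]
  | cons t g ih =>
      simp only [List.foldl_cons, atHead, List.any_cons]
      by_cases hm : PySem.Chars.startswith s t = true
      · by_cases hp : p < b
        · rw [if_pos ⟨hp, hm⟩, ih]
          simp [hm, hp]
        · rw [if_neg (by tauto), ih]
          simp [atHead, hp]
      · rw [if_neg (by tauto), ih]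
        simp [atHead, hm]

set_option maxHeartbeats 1000000 in
lemma bStep_eq (s : List Char) (best : Nat) (hb : best ≤ 7) :
    bStep s best = min best (hd s) := by
  unfold bStep bTerms
  rw [List.foldl_append, List.foldl_append, List.foldl_append, List.foldl_append,
      List.foldl_append, List.foldl_append]
  rw [List.foldl_map, List.foldl_map, List.foldl_map, List.foldl_map,
      List.foldl_map, List.foldl_map, List.foldl_map]
  rw [foldl_grp, foldl_grp, foldl_grp, foldl_grp, foldl_grp, foldl_grp, foldl_grp]
  unfold hd
  generalize atHead bG0 s = a0
  generalize atHead bG1 s = a1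
  generalize atHead bG2 s = a2
  generalize atHead bG3 s = a3
  generalize atHead bG4 s = a4
  generalize atHead bG5 s = a5
  generalize atHead bG6 s = a6
  revert a0 a1 a2 a3 a4 a5 a6
  interval_cases best <;> decide

lemma isIn_cons (t : List Char) (c : Char) (L : List Char) :
    PySem.Chars.isIn t (c :: L) = (PySem.Chars.startswith (c :: L) t || PySem.Chars.isIn t L) := by
  rcases h : PySem.Chars.startswith (c :: L) t || PySem.Chars.isIn t L with _ | _
  · simp only [Bool.or_eq_false_iff] at h
    rw [PySem.Chars.isIn_eq_false_iff, List.infix_cons_iff]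
    push Not
    exact ⟨by rw [← PySem.Chars.startswith_iff]; simp [h.1],
           by rw [← PySem.Chars.isIn_iff_infix]; simp [h.2]⟩
  · rw [PySem.Chars.isIn_iff_infix, List.infix_cons_iff]
    rcases Bool.or_eq_true_iff.mp h with h' | h'
    · exact Or.inl ((PySem.Chars.startswith_iff _ _).mp h')
    · exact Or.inr ((PySem.Chars.isIn_iff_infix _ _).mp h')

lemma anyIn_cons (g : List (List Char)) (c : Char) (L : List Char) :
    anyIn g (c :: L) = (atHead g (c :: L) || anyIn g L) := by
  induction g with
  | nil => simp [anyIn, atHead]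
  | cons t g ih =>
      simp only [anyIn, atHead, List.any_cons] at *
      rw [isIn_cons, ih]
      cases PySem.Chars.startswith (c :: L) t <;> cases PySem.Chars.isIn t L <;> simp

lemma cand_cons (c : Char) (L : List Char) :
    cand (c :: L) = min (hd (c :: L)) (cand L) := by
  unfold cand hd
  rw [anyIn_cons, anyIn_cons, anyIn_cons, anyIn_cons, anyIn_cons, anyIn_cons, anyIn_cons]
  generalize atHead bG0 (c :: L) = a0
  generalize atHead bG1 (c :: L) = a1
  generalize atHead bG2 (c :: L) = a2
  generalize atHead bG3 (c :: L) = a3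
  generalize atHead bG4 (c :: L) = a4
  generalize atHead bG5 (c :: L) = a5
  generalize atHead bG6 (c :: L) = a6
  generalize anyIn bG0 L = c0
  generalize anyIn bG1 L = c1
  generalize anyIn bG2 L = c2
  generalize anyIn bG3 L = c3
  generalize anyIn bG4 L = c4
  generalize anyIn bG5 L = c5
  generalize anyIn bG6 L = c6
  revert a0 a1 a2 a3 a4 a5 a6 c0 c1 c2 c3 c4 c5 c6
  decide

lemma hd_le (s : List Char) : hd s ≤ 7 := by
  unfold hd; split_ifs <;> omega

lemma cand_le (L : List Char) : cand L ≤ 7 := by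
  unfold cand; split_ifs <;> omega

lemma bLoop_eq (L : List Char) : ∀ best, best ≤ 7 → bLoop L best = min best (cand L) := by
  induction L with
  | nil =>
      intro best hb
      have h0 : hd [] = 7 := by decide
      have h1 : cand [] = 7 := by decide
      rw [bLoop, bStep_eq _ _ hb, h0, h1]
  | cons c L ih =>
      intro best hb
      rw [bLoop, bStep_eq _ _ hb,
          ih _ (le_trans (min_le_min_left best (hd_le _)) (by omega)), cand_cons]
      omega

-- ===== VERDICT (by name: the statement is the Claim_ definition above) =====
theorem get_visualization_type_spec : Claim_equal_get_visualization_type := by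
  intro query _
  unfold Spec_get_visualization_type get_visualization_type_alt
  have h : bLoop (PySem.Chars.lower query.toList) (bNames.length - 1)
      = cand (PySem.Chars.lower query.toList) := by
    rw [show bNames.length - 1 = 7 from rfl, bLoop_eq _ 7 (le_refl 7)]
    have := cand_le (PySem.Chars.lower query.toList)
    omega
  rw [h]
  unfold get_visualization_type cand anyIn bG0 bG1 bG2 bG3 bG4 bG5 bG6
  simp only [List.any_cons, List.any_nil, PySem.Str.isIn_eq, PySem.Str.toList_lower,
    Bool.or_false]
  split_ifs <;> rfl
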